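-- pv_equiv track=rewrite | github.com/leeyjeen/TIL | problem-solving/adventofcode2020/day14.py | apply_masking2
-- ===== SOURCE A (Python) =====
-- def apply_masking2(mask, addr, val):
--     bin_addr = bin(addr)[2:].zfill(36)
--     values_after_masking = dict({"": val})  # 빈 문자열인 key로 초기화
--     for m, a in zip(mask, bin_addr):
--         if m == "0":    # 각 key 값에 addr 값 더해서 업데이트
--             new_values_after_masking = dict()
--             for v in values_after_masking:
--                 new_values_after_masking[v+a] = val
--             values_after_masking = new_values_after_masking
--         elif m == "1":  # 각 key 값에 "1" 값 더해서 업데이트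
--             new_values_after_masking = dict()
--             for v in values_after_masking:
--                 new_values_after_masking[v+"1"] = val
--             values_after_masking = new_values_after_masking
--         elif m == "X":  # 각 key 값에 모든 경우 ("0", "1") 값 더해서 업데이트
--             new_values_after_masking = dict()
--             for v in values_after_masking:
--                 new_values_after_masking[v+"0"] = val
--                 new_values_after_masking[v+"1"] = val
--             values_after_masking = new_values_after_masking
--     return values_after_masking
-- ===== SOURCE B (Python) =====
-- def combos(k):
--     if k == 0:
--         return [""]
--     rest = combos(k - 1)
--     return ["0" + c for c in rest] + ["1" + c for c in rest]
--
--
-- def fill(template, combo):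
--     if not template:
--         return ""
--     c, rest = template[0], template[1:]
--     if c == "X":
--         return combo[0] + fill(rest, combo[1:])
--     return c + fill(rest, combo)
--
--
-- def apply_masking2(mask, addr, val):
--     bin_addr = bin(addr)[2:].zfill(36)
--     template = ""
--     for m, a in zip(mask, bin_addr):
--         if m == "0":
--             template += a
--         elif m == "1":
--             template += "1"
--         elif m == "X":
--             template += "X"
--     result = {}
--     for combo in combos(template.count("X")):
--         result[fill(template, combo)] = val
--     return result
-- ===== Notes on version B (the rewrite author's own statement) =====
-- stated objective: alternative
-- what changed: A repeatedly rebuilds the whole dict at every mask character (doubling it at each 'X'); B makes one template pass over zip(mask, bin_addr) and then fills the floating 'X' positions with every 0/1 combination generated recursively, inserting each completed address once.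
import Mathlib
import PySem

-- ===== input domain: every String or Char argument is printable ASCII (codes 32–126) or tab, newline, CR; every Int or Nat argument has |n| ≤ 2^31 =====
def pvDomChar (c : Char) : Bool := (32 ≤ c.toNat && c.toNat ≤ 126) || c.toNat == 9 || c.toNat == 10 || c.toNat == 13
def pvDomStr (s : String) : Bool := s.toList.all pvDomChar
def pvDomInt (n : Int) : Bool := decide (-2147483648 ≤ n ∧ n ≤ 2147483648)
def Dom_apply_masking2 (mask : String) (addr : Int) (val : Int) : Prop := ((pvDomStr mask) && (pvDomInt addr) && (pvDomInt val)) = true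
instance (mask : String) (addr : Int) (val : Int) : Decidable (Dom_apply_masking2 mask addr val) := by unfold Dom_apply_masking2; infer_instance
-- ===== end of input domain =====

-- B replaces A's repeated dict-rebuilding (doubling the dict at every 'X') by a single
-- template pass over zip(mask, bin_addr) followed by a combinatorial fill of the floating
-- positions (objective: alternative decomposition, same asymptotic cost).

-- ===== PORT A =====
-- bin(addr)[2:].zfill(36), shared verbatim by both Pythons
def pvBinAddr (addr : Int) : List Char :=
  PySem.Chars.zfill (PySem.List.slice (PySem.Int.pyBin addr).toList (some 2) none) 36

-- body of A's 'for m, a in zip(mask, bin_addr)' loop: rebuilds the dict from its keys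
def pvStepA (val : Int) (d : PySem.Dict (List Char) Int) (p : Char × Char) :
    PySem.Dict (List Char) Int :=
  if p.1 = '0' then
    d.keys.foldl (fun nd v => nd.insert (v ++ [p.2]) val) PySem.Dict.empty
  else if p.1 = '1' then
    d.keys.foldl (fun nd v => nd.insert (v ++ ['1']) val) PySem.Dict.empty
  else if p.1 = 'X' then
    d.keys.foldl (fun nd v => (nd.insert (v ++ ['0']) val).insert (v ++ ['1']) val)
      PySem.Dict.empty
  else d

def apply_masking2 (mask : String) (addr : Int) (val : Int) : List (String × Int) :=
  let binAddr := pvBinAddr addr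
  let init : PySem.Dict (List Char) Int := PySem.Dict.ofList [([], val)]
  let final := (mask.toList.zip binAddr).foldl (pvStepA val) init
  final.items.map (fun kv => (String.ofList kv.1, kv.2))

-- ===== PORT B =====
-- B's combos(k): all 0/1 strings of length k, first position varying slowest
def pvCombos : Nat → List (List Char)
  | 0 => [[]]
  | n + 1 => (pvCombos n).map ('0' :: ·) ++ (pvCombos n).map ('1' :: ·)

-- B's fill(template, combo): substitute the combo's bits at the 'X' positions
def pvFill : List Char → List Char → List Char
  | [], _ => []
  | c :: t, cs =>
    if c = 'X' then
      match cs with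
      | b :: bs => b :: pvFill t bs
      | [] => []  -- unreachable: Python's combo[0] is only evaluated with combo nonempty
    else c :: pvFill t cs

def apply_masking2_alt (mask : String) (addr : Int) (val : Int) : List (String × Int) :=
  let binAddr := pvBinAddr addr
  let template := (mask.toList.zip binAddr).foldl
    (fun t p =>
      if p.1 = '0' then t ++ [p.2]
      else if p.1 = '1' then t ++ ['1']
      else if p.1 = 'X' then t ++ ['X']
      else t) []
  let d := (pvCombos (template.count 'X')).foldl
    (fun d combo => d.insert (pvFill template combo) val)
    (PySem.Dict.empty : PySem.Dict (List Char) Int)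
  d.items.map (fun kv => (String.ofList kv.1, kv.2))

-- ===== PRECONDITION & SPEC =====
def Spec_apply_masking2 (mask : String) (addr : Int) (val : Int) (out : List (String × Int)) : Prop := out = apply_masking2_alt mask addr val
instance (mask : String) (addr : Int) (val : Int) (out : List (String × Int)) : Decidable (Spec_apply_masking2 mask addr val out) := by unfold Spec_apply_masking2; infer_instance

-- ===== CLAIM (what is proved, stated in full; the proofs are below) =====
def Claim_equal_apply_masking2 : Prop := ∀ (mask : String) (addr : Int) (val : Int), Dom_apply_masking2 mask addr val → Spec_apply_masking2 mask addr val (apply_masking2 mask addr val)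

-- ===== LEMMAS AND PROOFS =====

-- the list of expanded keys, by recursion on the zipped pairs (front char chosen first)
def pvE : List (Char × Char) → List (List Char)
  | [] => [[]]
  | p :: ps =>
    if p.1 = '0' then (pvE ps).map (p.2 :: ·)
    else if p.1 = '1' then (pvE ps).map ('1' :: ·)
    else if p.1 = 'X' then (pvE ps).map ('0' :: ·) ++ (pvE ps).map ('1' :: ·)
    else pvE ps

-- front-recursive form of B's template loop
def pvTmpl : List (Char × Char) → List Char
  | [] => []
  | p :: ps =>
    if p.1 = '0' then p.2 :: pvTmpl ps
    else if p.1 = '1' then '1' :: pvTmpl ps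
    else if p.1 = 'X' then 'X' :: pvTmpl ps
    else pvTmpl ps

lemma pvTmpl_foldl (ps : List (Char × Char)) (t : List Char) :
    ps.foldl
      (fun t p =>
        if p.1 = '0' then t ++ [p.2]
        else if p.1 = '1' then t ++ ['1']
        else if p.1 = 'X' then t ++ ['X']
        else t) t = t ++ pvTmpl ps := by
  induction ps generalizing t with
  | nil => simp [pvTmpl]
  | cons p ps ih => simp only [List.foldl_cons, pvTmpl]; split_ifs <;> simp [ih]

lemma pvE_nodup (ps : List (Char × Char)) : (pvE ps).Nodup := by
  induction ps with
  | nil => simp [pvE]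
  | cons p ps ih =>
    have hc : ∀ c : Char, Function.Injective (c :: · : List Char → List Char) := by
      intro c x y h; simpa using h
    simp only [pvE]
    split_ifs
    · exact ih.map (hc _)
    · exact ih.map (hc _)
    · refine (ih.map (hc _)).append (ih.map (hc _)) ?_
      intro x hx hy
      simp only [List.mem_map] at hx hy
      obtain ⟨a, _, rfl⟩ := hx
      obtain ⟨b, _, hb⟩ := hy
      simp at hb
    · exact ih

lemma pvFill_cons_ne (c : Char) (t cs : List Char) (h : c ≠ 'X') :
    pvFill (c :: t) cs = c :: pvFill t cs := by
  simp [pvFill, h]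

lemma pvKeysB (ps : List (Char × Char)) (h : ∀ p ∈ ps, p.2 ≠ 'X') :
    (pvCombos ((pvTmpl ps).count 'X')).map (pvFill (pvTmpl ps)) = pvE ps := by
  induction ps with
  | nil => simp [pvTmpl, pvCombos, pvE, pvFill]
  | cons p ps ih =>
    have h2 : p.2 ≠ 'X' := h p (by simp)
    have ih' := ih (fun q hq => h q (List.mem_cons_of_mem _ hq))
    simp only [pvTmpl, pvE]
    split_ifs with h0 h1 hX
    · rw [List.count_cons_of_ne h2]
      rw [← ih']
      simp [List.map_map, Function.comp_def, pvFill_cons_ne _ _ _ h2]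
    · rw [List.count_cons_of_ne (by decide)]
      rw [← ih']
      simp only [List.map_map, Function.comp_def]
      exact List.map_congr_left fun a _ => pvFill_cons_ne _ _ a (by decide)
    · rw [List.count_cons_self]
      rw [← ih']
      simp only [pvCombos, List.map_append, List.map_map, Function.comp_def]
      congr 1
    · exact ih'

lemma pvDigitChar_mem (n : Nat) : Nat.digitChar (n % 2) = '0' ∨ Nat.digitChar (n % 2) = '1' := by
  rcases Nat.mod_two_eq_zero_or_one n with h | h <;> rw [h] <;> simp [Nat.digitChar]
lemma pvToDigitsCore_mem (f : Nat) : ∀ (n : Nat) (acc : List Char),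
    (∀ c ∈ acc, c = '0' ∨ c = '1') → ∀ c ∈ Nat.toDigitsCore 2 f n acc, c = '0' ∨ c = '1' := by
  induction f with
  | zero => intro n acc hacc; simpa [Nat.toDigitsCore] using hacc
  | succ f ih =>
    intro n acc hacc c hc
    simp only [Nat.toDigitsCore] at hc
    split at hc
    · rcases List.mem_cons.1 hc with rfl | h
      · exact pvDigitChar_mem n
      · exact hacc _ h
    · refine ih _ _ ?_ _ hc
      intro d hd
      rcases List.mem_cons.1 hd with rfl | h
      · exact pvDigitChar_mem n
      · exact hacc _ h
lemma pvToDigits_mem (n : Nat) : ∀ c ∈ Nat.toDigits 2 n, c = '0' ∨ c = '1' :=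
  pvToDigitsCore_mem _ _ _ (by simp)

lemma pvMem_zfill (cs : List Char) (w : Int) (c : Char) (h : c ∈ PySem.Chars.zfill cs w) :
    c ∈ cs ∨ c = '0' := by
  unfold PySem.Chars.zfill at h
  split at h
  · exact Or.inl h
  · split at h
    · rename_i c' rest _
      split at h
      · rcases List.mem_cons.1 h with rfl | h2
        · exact Or.inl (by simp)
        · rcases List.mem_append.1 h2 with h3 | h3
          · exact Or.inr (List.eq_of_mem_replicate h3)
          · exact Or.inl (by simp [h3])
      · rcases List.mem_append.1 h with h3 | h3
        · exact Or.inr (List.eq_of_mem_replicate h3)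
        · exact Or.inl h3
    · exact Or.inr (List.eq_of_mem_replicate h)
lemma pvBinAddr_no_X (addr : Int) : ∀ c ∈ pvBinAddr addr, c ≠ 'X' := by
  intro c hc
  rcases pvMem_zfill _ _ _ hc with h | rfl
  · have h2 := PySem.List.mem_of_mem_slice _ _ _ h
    simp only [PySem.Int.pyBin, String.toList_ofList] at h2
    unfold PySem.Int.toBinChars0b at h2
    split at h2 <;>
      · simp only [List.mem_cons] at h2
        rcases h2 with rfl | h2 <;> try decide
        all_goals first
          | (rcases h2 with rfl | h2; · decide
             rcases h2 with rfl | h2; · decide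
             rcases pvToDigits_mem _ _ h2 with rfl | rfl <;> decide)
          | (rcases h2 with rfl | h2; · decide
             rcases pvToDigits_mem _ _ h2 with rfl | rfl <;> decide)
  · decide

lemma pvItems_insert_not_mem (d : PySem.Dict (List Char) Int) (k : List Char) (v : Int)
    (h : k ∉ d.keys) : (d.insert k v).items = d.items ++ [(k, v)] := by
  have hc : d.contains k = false := by
    simp only [PySem.Dict.contains, List.any_eq_false]
    intro p hp
    have : p.1 ≠ k := fun hk => h (hk ▸ List.mem_map_of_mem hp)
    simpa using this
  simp [PySem.Dict.insert, hc]
lemma pvFoldl_insert (val : Int) (ks : List (List Char)) (d : PySem.Dict (List Char) Int)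
    (h : (d.keys ++ ks).Nodup) :
    (ks.foldl (fun nd k => nd.insert k val) d).items = d.items ++ ks.map (fun k => (k, val)) := by
  induction ks generalizing d with
  | nil => simp
  | cons k ks ih =>
    have hk : k ∉ d.keys := fun hm => (List.disjoint_of_nodup_append h) hm (by simp)
    have hitems : (d.insert k val).items = d.items ++ [(k, val)] :=
      pvItems_insert_not_mem d k val hk
    have hkeys : (d.insert k val).keys = d.keys ++ [k] := by simp [PySem.Dict.keys, hitems]
    have h' : ((d.insert k val).keys ++ ks).Nodup := by
      rw [hkeys]; simp only [List.append_assoc, List.singleton_append]; simpa using h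
    rw [List.foldl_cons, ih _ h', hitems]; simp
-- a fresh-keys fold's items, starting from the empty dict
lemma pvFoldl_insert_empty (val : Int) (ks : List (List Char)) (h : ks.Nodup) :
    (ks.foldl (fun nd k => nd.insert k val) PySem.Dict.empty).items
      = ks.map (fun k => (k, val)) := by
  have := pvFoldl_insert val ks PySem.Dict.empty (by simpa [PySem.Dict.empty, PySem.Dict.keys])
  simpa [PySem.Dict.empty] using this
lemma pvSnoc_inj (v w : List Char) (b c : Char) (h : v ++ [b] = w ++ [c]) : v = w ∧ b = c := by
  have := List.append_inj' h rfl
  exact ⟨this.1, by simpa using this.2⟩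
lemma pvNodup_map_snoc (K : List (List Char)) (c : Char) (hK : K.Nodup) :
    (K.map (· ++ [c])).Nodup :=
  hK.map fun _ _ h => (pvSnoc_inj _ _ _ _ h).1
lemma pvNodup_flatMap2 (K : List (List Char)) (hK : K.Nodup) :
    (K.flatMap (fun v => [v ++ ['0'], v ++ ['1']])).Nodup := by
  induction K with
  | nil => simp
  | cons v K ih =>
    simp only [List.flatMap_cons, List.cons_append, List.nil_append]
    have hv : v ∉ K := (List.nodup_cons.1 hK).1
    have ihK := ih (List.nodup_cons.1 hK).2
    refine List.nodup_cons.2 ⟨?_, List.nodup_cons.2 ⟨?_, ihK⟩⟩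
    · intro hmem
      rcases List.mem_cons.1 hmem with h | h
      · exact absurd (pvSnoc_inj _ _ _ _ h).2 (by decide)
      · rcases List.mem_flatMap.1 h with ⟨w, hw, hmem2⟩
        rcases List.mem_cons.1 hmem2 with h2 | h2
        · exact hv ((pvSnoc_inj _ _ _ _ h2).1 ▸ hw)
        · rcases List.mem_singleton.1 h2 with h3
          exact absurd (pvSnoc_inj _ _ _ _ h3).2 (by decide)
    · intro hmem
      rcases List.mem_flatMap.1 hmem with ⟨w, hw, hmem2⟩
      rcases List.mem_cons.1 hmem2 with h2 | h2
      · exact absurd (pvSnoc_inj _ _ _ _ h2).2 (by decide)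
      · rcases List.mem_singleton.1 h2 with h3
        exact hv ((pvSnoc_inj _ _ _ _ h3).1 ▸ hw)
-- the double-insert loop of the 'X' branch is the single-insert loop over the doubled key list
lemma pvFoldl_double (val : Int) (K : List (List Char)) (d : PySem.Dict (List Char) Int) :
    K.foldl (fun nd v => (nd.insert (v ++ ['0']) val).insert (v ++ ['1']) val) d
      = (K.flatMap (fun v => [v ++ ['0'], v ++ ['1']])).foldl
          (fun nd k => nd.insert k val) d := by
  induction K generalizing d with
  | nil => rfl
  | cons v K ih => simp only [List.foldl_cons, List.flatMap_cons, List.foldl_append]; exact ih _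
lemma pvAK (val : Int) (ps : List (Char × Char)) (K : List (List Char)) (hK : K.Nodup) :
    (ps.foldl (pvStepA val) (PySem.Dict.mk (K.map (fun k => (k, val))))).items
      = (K.flatMap (fun k => (pvE ps).map (k ++ ·))).map (fun k => (k, val)) := by
  induction ps generalizing K with
  | nil => simp [pvE]
  | cons p ps ih =>
    have hkeys : (PySem.Dict.mk (K.map (fun k => (k, val))) : PySem.Dict (List Char) Int).keys = K := by
      simp [PySem.Dict.keys, Function.comp_def]
    rw [List.foldl_cons]
    simp only [pvE]
    by_cases h0 : p.1 = '0'
    · have hK' := pvNodup_map_snoc K p.2 hK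
      have hstep : pvStepA val (PySem.Dict.mk (K.map (fun k => (k, val)))) p
          = PySem.Dict.mk ((K.map (· ++ [p.2])).map (fun k => (k, val))) := by
        apply PySem.Dict.ext
        unfold pvStepA
        rw [if_pos h0, hkeys]
        have := pvFoldl_insert_empty val (K.map (· ++ [p.2])) hK'
        rw [List.foldl_map] at this
        exact this
      rw [hstep, ih _ hK', h0]
      simp only [if_pos]
      rw [List.flatMap_map]
      simp [List.map_map, Function.comp_def, List.append_assoc]
    · by_cases h1 : p.1 = '1'
      · have hK' := pvNodup_map_snoc K '1' hK
        have hstep : pvStepA val (PySem.Dict.mk (K.map (fun k => (k, val)))) p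
            = PySem.Dict.mk ((K.map (· ++ ['1'])).map (fun k => (k, val))) := by
          apply PySem.Dict.ext
          unfold pvStepA
          rw [if_neg h0, if_pos h1, hkeys]
          have := pvFoldl_insert_empty val (K.map (· ++ ['1'])) hK'
          rw [List.foldl_map] at this
          exact this
        rw [hstep, ih _ hK']
        rw [if_neg h0, if_pos h1]
        rw [List.flatMap_map]
        simp [List.map_map, Function.comp_def, List.append_assoc]
      · by_cases hX : p.1 = 'X'
        · have hK' := pvNodup_flatMap2 K hK
          have hstep : pvStepA val (PySem.Dict.mk (K.map (fun k => (k, val)))) p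
              = PySem.Dict.mk ((K.flatMap (fun v => [v ++ ['0'], v ++ ['1']])).map
                  (fun k => (k, val))) := by
            apply PySem.Dict.ext
            unfold pvStepA
            rw [if_neg h0, if_neg h1, if_pos hX, hkeys]
            rw [pvFoldl_double]
            exact pvFoldl_insert_empty val _ hK'
          rw [hstep, ih _ hK']
          rw [if_neg h0, if_neg h1, if_pos hX]
          rw [List.flatMap_assoc]
          simp [List.map_map, Function.comp_def, List.append_assoc]
        · have hstep : pvStepA val (PySem.Dict.mk (K.map (fun k => (k, val)))) p
              = PySem.Dict.mk (K.map (fun k => (k, val))) := by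
            unfold pvStepA
            rw [if_neg h0, if_neg h1, if_neg hX]
          rw [hstep, ih _ hK]
          rw [if_neg h0, if_neg h1, if_neg hX]

-- ===== VERDICT (by name: the statement is the Claim_ definition above) =====
theorem apply_masking2_spec : Claim_equal_apply_masking2 := by
  intro mask addr val _
  unfold Spec_apply_masking2 apply_masking2 apply_masking2_alt
  have hX : ∀ p ∈ mask.toList.zip (pvBinAddr addr), p.2 ≠ 'X' :=
    fun p hp => pvBinAddr_no_X addr p.2 (List.of_mem_zip hp).2
  have hkeysB := pvKeysB (mask.toList.zip (pvBinAddr addr)) hX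
  have hEnd : (pvE (mask.toList.zip (pvBinAddr addr))).Nodup := pvE_nodup _
  have hB : ((pvCombos (((pvTmpl (mask.toList.zip (pvBinAddr addr)))).count 'X')).foldl
      (fun d combo => d.insert (pvFill (pvTmpl (mask.toList.zip (pvBinAddr addr))) combo) val)
      (PySem.Dict.empty : PySem.Dict (List Char) Int)).items
      = (pvE (mask.toList.zip (pvBinAddr addr))).map (fun k => (k, val)) := by
    have hnd : ((pvCombos ((pvTmpl (mask.toList.zip (pvBinAddr addr))).count 'X')).map
        (pvFill (pvTmpl (mask.toList.zip (pvBinAddr addr))))).Nodup := hkeysB ▸ hEnd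
    have h2 := pvFoldl_insert_empty val _ hnd
    rw [List.foldl_map] at h2
    rw [h2, hkeysB]
  have hinit : (PySem.Dict.ofList [(([] : List Char), val)])
      = PySem.Dict.mk (([[]] : List (List Char)).map (fun k => (k, val))) := by
    apply PySem.Dict.ext
    simp [PySem.Dict.ofList, PySem.Dict.update, PySem.Dict.insert, PySem.Dict.contains,
      PySem.Dict.empty]
  have hA : ((mask.toList.zip (pvBinAddr addr)).foldl (pvStepA val)
      (PySem.Dict.ofList [(([] : List Char), val)])).items
      = (pvE (mask.toList.zip (pvBinAddr addr))).map (fun k => (k, val)) := by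
    rw [hinit, pvAK val _ [[]] (by simp)]
    simp
  simp only [pvTmpl_foldl, List.nil_append]
  rw [hA, hB]
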